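-- pv_equiv track=rewrite | github.com/krzychsol/ASD | EGZAMIN20/Termin2/zad3.py | DFS
-- ===== SOURCE A (Python) =====
-- def DFS(G):
--     n = len(G)
--     visited = [False] * n
--     stack = []
--
--     def DFSVisit(G, u, visited):
--         visited[u] = True
--         for v in range(n):
--             if not visited[v] and G[u][v] == 1:
--                 DFSVisit(G,v,visited)
--                 stack.append(v)
--
--     maks = 0
--     idx = 0
--     for i in range(n):
--         cnt = 0
--         for j in range(n):
--             if G[i][j] == 1:
--                 cnt += 1
--         if cnt > maks:
--             maks = cnt
--             idx = i
--
--     for u in range(n):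
--         if not visited[u] and G[idx][u] == 1:
--             DFSVisit(G,u,visited)
--             stack.append(u)
--
--     stack.append(idx)
--     return stack
-- ===== SOURCE B (Python) =====
-- def DFS(G):
--     n = len(G)
--     visited = [False] * n
--     # same max-degree start-node scan as the original (strict >, first winner)
--     maks = 0
--     idx = 0
--     for i in range(n):
--         cnt = 0
--         for j in range(n):
--             if G[i][j] == 1:
--                 cnt += 1
--         if cnt > maks:
--             maks = cnt
--             idx = i
--     result = []
--     for u in range(n):
--         if not visited[u] and G[idx][u] == 1:
--             visited[u] = True
--             frames = [(u, 0)]          # explicit DFS stack: (node, next child index)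
--             while frames:
--                 node, k = frames[-1]
--                 child = next((v for v in range(k, n)
--                               if not visited[v] and G[node][v] == 1), None)
--                 if child is None:
--                     frames.pop()
--                     result.append(node)   # post-order emission
--                 else:
--                     frames[-1] = (node, child + 1)
--                     visited[child] = True
--                     frames.append((child, 0))
--     result.append(idx)
--     return result
-- ===== Notes on version B (the rewrite author's own statement) =====
-- stated objective: alternative
-- what changed: A's recursive DFSVisit is replaced by an explicit stack of (node, next-child-index) frames run in a while loop, emitting a node in post-order when its frame is popped; the max-degree start scan is kept verbatim.
import Mathlib
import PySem

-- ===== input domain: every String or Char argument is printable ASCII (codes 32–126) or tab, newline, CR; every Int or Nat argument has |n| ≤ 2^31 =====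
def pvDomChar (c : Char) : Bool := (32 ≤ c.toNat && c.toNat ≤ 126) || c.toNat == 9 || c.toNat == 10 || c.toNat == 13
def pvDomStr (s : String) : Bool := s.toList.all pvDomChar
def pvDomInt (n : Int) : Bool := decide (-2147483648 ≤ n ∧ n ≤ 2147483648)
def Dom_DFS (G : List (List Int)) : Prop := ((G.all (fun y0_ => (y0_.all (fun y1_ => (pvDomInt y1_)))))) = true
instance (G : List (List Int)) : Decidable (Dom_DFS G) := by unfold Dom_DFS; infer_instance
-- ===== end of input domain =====

-- B replaces A's recursive DFSVisit by an explicit stack of (node, next-child-index) frames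
-- with post-order emission on pop (objective: alternative — same output, same asymptotic cost).

-- ===== PORT A =====
-- G[u][v] == 1; indices are in range under Pre_DFS, so getD is only a totality guard
def pvEdge (G : List (List Int)) (u v : Nat) : Bool := (G.getD u []).getD v 0 == 1
-- visited[v]; in Python v < len(visited) always holds, so the default is only a totality guard
def pvVis (V : List Bool) (v : Nat) : Bool := V.getD v true
-- number of unvisited entries (termination measure of runM, and proof-side measure)
def pvCF (V : List Bool) : Nat := V.count false

-- the max-degree start-node scan (strict >, first winner); this code is verbatim identical in
-- the two Python sources (B keeps A's scan), so both ports share this helper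
def pvMaxDegIdx (G : List (List Int)) : Nat :=
  ((List.range G.length).foldl (fun (s : Nat × Nat) i =>
      let cnt := (List.range G.length).foldl (fun c j => if pvEdge G i j then c + 1 else c) 0
      if cnt > s.1 then (cnt, i) else s) (0, 0)).2

mutual
-- DFSVisit(G,u,visited): mark u, then scan children 0..n-1; returns (visited, nodes appended).
-- fuel (n+1 at every top-level call) only bounds the recursion depth for Lean's termination
-- checker; it is never exhausted, since each nested call strictly shrinks the unvisited count.
def visitA (G : List (List Int)) (n : Nat) (f u : Nat) (V : List Bool) : List Bool × List Int :=
  match f with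
  | 0 => (V, [])
  | f'+1 => loopA G n f' u 0 (V.set u true)
termination_by (f, 0)
-- the 'for v in range(n)' body of DFSVisit, continued from child index v
def loopA (G : List (List Int)) (n : Nat) (f u v : Nat) (V : List Bool) : List Bool × List Int :=
  if h : v < n then
    if pvVis V v = false ∧ pvEdge G u v then
      let r := visitA G n f v V
      let r2 := loopA G n f u (v+1) r.1
      (r2.1, r.2 ++ (v : Int) :: r2.2)
    else loopA G n f u (v+1) V
  else (V, [])
termination_by (f, n - v + 1)
end

def DFS (G : List (List Int)) : List Int :=
  ((List.range G.length).foldl (fun (s : List Bool × List Int) u =>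
      if pvVis s.1 u = false ∧ pvEdge G (pvMaxDegIdx G) u then
        ((visitA G G.length (G.length+1) u s.1).1,
         s.2 ++ (visitA G G.length (G.length+1) u s.1).2 ++ [(u : Int)])
      else s) (List.replicate G.length false, [])).2 ++ [(pvMaxDegIdx G : Int)]

-- ===== PORT B =====
-- next((v for v in range(k, n) if not visited[v] and G[node][v] == 1), None)
def findNext (G : List (List Int)) (n : Nat) (V : List Bool) (u k : Nat) : Option Nat :=
  if k < n then
    if pvVis V k = false ∧ pvEdge G u k then some k else findNext G n V u (k+1)
  else none
termination_by n - k

-- the next three lemmas are cited by runM's decreasing_by (termination only)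
theorem findNext_vis (G : List (List Int)) (n : Nat) (V : List Bool) (u : Nat) :
    ∀ k v, findNext G n V u k = some v → pvVis V v = false := by
  intro k v
  fun_induction findNext G n V u k with
  | case1 k hk hc => intro h; cases h; exact hc.1
  | case2 k hk hc ih => exact ih
  | case3 k hk => intro h; cases h

theorem pvVis_false (V : List Bool) (v : Nat) (h : pvVis V v = false) : v < V.length := by
  cases Nat.lt_or_ge v V.length with
  | inl h' => exact h'
  | inr h' =>
    rw [pvVis, List.getD_eq_getElem?_getD, List.getElem?_eq_none (by omega)] at h
    cases h

theorem pvCF_set_lt (V : List Bool) (v : Nat) (h : pvVis V v = false) :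
    pvCF (V.set v true) < pvCF V := by
  induction V generalizing v with
  | nil => cases pvVis_false [] v h
  | cons b t ih =>
    cases v with
    | zero =>
      have hb : b = false := by simpa [pvVis] using h
      subst hb
      simp [pvCF]
    | succ v =>
      have h' : pvVis t v = false := by simpa [pvVis] using h
      have := ih v h'
      simp only [List.set_cons_succ, pvCF, List.count_cons] at *
      omega

-- the while-frames loop: look at the top frame (u,k); push the first unvisited child of u
-- from index k on, or — if none — pop the frame and emit u (post-order)
def runM (G : List (List Int)) (n : Nat) (frames : List (Nat × Nat)) (V : List Bool)
    (out : List Int) : List Bool × List Int :=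
  match frames with
  | [] => (V, out)
  | (u, k) :: rest =>
    match hf : findNext G n V u k with
    | some v => runM G n ((v, 0) :: (u, v+1) :: rest) (V.set v true) out
    | none => runM G n rest V (out ++ [(u : Int)])
termination_by 2 * pvCF V + frames.length
decreasing_by
  · have h1 := pvCF_set_lt V v (findNext_vis G n V u k v hf)
    simp only [List.length_cons]; omega
  · simp only [List.length_cons]; omega

def DFS_alt (G : List (List Int)) : List Int :=
  ((List.range G.length).foldl (fun (s : List Bool × List Int) u =>
      if pvVis s.1 u = false ∧ pvEdge G (pvMaxDegIdx G) u then
        runM G G.length [(u, 0)] (s.1.set u true) s.2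
      else s) (List.replicate G.length false, [])).2 ++ [(pvMaxDegIdx G : Int)]

-- ===== PRECONDITION & SPEC =====
-- Pre_DFS: exactly the inputs on which Python A returns: the degree scan reads G[i][j] for all
-- i, j < len(G), so any row shorter than len(G) raises IndexError (in A and in B alike).
def Pre_DFS (G : List (List Int)) : Prop := ∀ row ∈ G, G.length ≤ row.length
instance (G : List (List Int)) : Decidable (Pre_DFS G) := by unfold Pre_DFS; infer_instance
def pvWitness_DFS : List (List Int) := [[0, 1], [1, 1]]

def Spec_DFS (G : List (List Int)) (out : List Int) : Prop := out = DFS_alt G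
instance (G : List (List Int)) (out : List Int) : Decidable (Spec_DFS G out) := by unfold Spec_DFS; infer_instance

-- ===== CLAIM (what is proved, stated in full; the proofs are below) =====
def Claim_equal_DFS : Prop := ∀ (G : List (List Int)), Dom_DFS G → Pre_DFS G → Spec_DFS G (DFS G)

-- ===== LEMMAS AND PROOFS =====

theorem findNext_spec (G : List (List Int)) (n : Nat) (V : List Bool) (u : Nat) :
    ∀ k v, findNext G n V u k = some v →
      k ≤ v ∧ v < n ∧ pvVis V v = false ∧ pvEdge G u v = true ∧
      ∀ w, k ≤ w → w < v → ¬(pvVis V w = false ∧ pvEdge G u w = true) := by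
  intro k v
  fun_induction findNext G n V u k with
  | case1 k hk hc =>
    intro h
    cases h
    exact ⟨Nat.le_refl _, hk, hc.1, hc.2, fun w h1 h2 => absurd (Nat.lt_of_le_of_lt h1 h2) (Nat.lt_irrefl _)⟩
  | case2 k hk hc ih =>
    intro h
    obtain ⟨h1, h2, h3, h4, h5⟩ := ih h
    refine ⟨by omega, h2, h3, h4, ?_⟩
    intro w hw1 hw2
    by_cases hwk : w = k
    · subst hwk; exact fun hh => hc (by simpa using hh)
    · exact h5 w (by omega) hw2
  | case3 k hk =>
    intro h; cases h

theorem findNext_none (G : List (List Int)) (n : Nat) (V : List Bool) (u : Nat) :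
    ∀ k, findNext G n V u k = none →
      ∀ w, k ≤ w → w < n → ¬(pvVis V w = false ∧ pvEdge G u w = true) := by
  intro k
  fun_induction findNext G n V u k with
  | case1 k hk hc => intro h; cases h
  | case2 k hk hc ih =>
    intro h w hw1 hw2
    by_cases hwk : w = k
    · subst hwk; exact fun hh => hc (by simpa using hh)
    · exact ih h w (by omega) hw2
  | case3 k hk =>
    intro _ w hw1 hw2
    exact absurd hw2 (by omega)

theorem pvCF_set_le (V : List Bool) (v : Nat) : pvCF (V.set v true) ≤ pvCF V := by
  induction V generalizing v with
  | nil => simp [pvCF]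
  | cons b t ih =>
    cases v with
    | zero => cases b <;> simp [pvCF]
    | succ v =>
      have := ih v
      simp only [List.set_cons_succ, pvCF, List.count_cons] at *
      omega

theorem pvCF_le_length (V : List Bool) : pvCF V ≤ V.length := List.count_le_length

theorem runM_nil (G : List (List Int)) (n : Nat) (V : List Bool) (out : List Int) :
    runM G n [] V out = (V, out) := by
  rw [runM]

theorem runM_step_some (G : List (List Int)) (n u k v : Nat) (rest : List (Nat × Nat))
    (V : List Bool) (out : List Int) (h : findNext G n V u k = some v) :
    runM G n ((u,k) :: rest) V out = runM G n ((v,0) :: (u, v+1) :: rest) (V.set v true) out := by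
  conv => lhs; rw [runM]
  split <;> simp_all

theorem runM_step_none (G : List (List Int)) (n u k : Nat) (rest : List (Nat × Nat))
    (V : List Bool) (out : List Int) (h : findNext G n V u k = none) :
    runM G n ((u,k) :: rest) V out = runM G n rest V (out ++ [(u : Int)]) := by
  conv => lhs; rw [runM]
  split <;> simp_all

theorem loopA_none (G : List (List Int)) (n f u : Nat) :
    ∀ m v V, n - v ≤ m →
      (∀ w, v ≤ w → w < n → ¬(pvVis V w = false ∧ pvEdge G u w = true)) →
      loopA G n f u v V = (V, []) := by
  intro m
  induction m with
  | zero =>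
    intro v V hm hw
    rw [loopA, dif_neg (by omega)]
  | succ m ih =>
    intro v V hm hw
    by_cases hv : v < n
    · rw [loopA, dif_pos hv, if_neg (hw v (Nat.le_refl _) hv)]
      exact ih (v+1) V (by omega) (fun w h1 h2 => hw w (by omega) h2)
    · rw [loopA, dif_neg hv]

theorem loopA_skip (G : List (List Int)) (n f u : Nat) :
    ∀ m k v V, v - k ≤ m → k ≤ v → v ≤ n →
      (∀ w, k ≤ w → w < v → ¬(pvVis V w = false ∧ pvEdge G u w = true)) →
      loopA G n f u k V = loopA G n f u v V := by
  intro m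
  induction m with
  | zero =>
    intro k v V hm hkv hvn hw
    have : k = v := by omega
    subst this; rfl
  | succ m ih =>
    intro k v V hm hkv hvn hw
    by_cases heq : k = v
    · subst heq; rfl
    · have hk : k < n := by omega
      rw [loopA, dif_pos hk, if_neg (hw k (Nat.le_refl _) (by omega))]
      exact ih (k+1) v V (by omega) (by omega) hvn (fun w h1 h2 => hw w (by omega) h2)

theorem loopA_hit (G : List (List Int)) (n f u v : Nat) (V : List Bool)
    (hv : v < n) (hc : pvVis V v = false ∧ pvEdge G u v = true) :
    loopA G n (f+1) u v V =
      ((loopA G n (f+1) u (v+1) (visitA G n (f+1) v V).1).1,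
       (visitA G n (f+1) v V).2 ++ (v : Int) :: (loopA G n (f+1) u (v+1) (visitA G n (f+1) v V).1).2) := by
  rw [loopA, dif_pos hv, if_pos hc]

theorem visitA_succ (G : List (List Int)) (n f u : Nat) (V : List Bool) :
    visitA G n (f+1) u V = loopA G n f u 0 (V.set u true) := by
  rw [visitA]

-- preservation: visitA/loopA keep the visited list's length and never grow the unvisited count
theorem pres (G : List (List Int)) (n : Nat) :
    ∀ f, (∀ u V, (visitA G n f u V).1.length = V.length ∧ pvCF (visitA G n f u V).1 ≤ pvCF V)
       ∧ (∀ u v V, (loopA G n f u v V).1.length = V.length ∧ pvCF (loopA G n f u v V).1 ≤ pvCF V) := by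
  intro f
  induction f using Nat.strongRecOn with
  | ind f ihf =>
  have hP : ∀ u V, (visitA G n f u V).1.length = V.length ∧ pvCF (visitA G n f u V).1 ≤ pvCF V := by
    intro u V
    match f with
    | 0 => simp [visitA]
    | f'+1 =>
      rw [visitA_succ]
      have hl := (ihf f' (by omega)).2 u 0 (V.set u true)
      refine ⟨?_, ?_⟩
      · rw [hl.1, List.length_set]
      · exact Nat.le_trans hl.2 (pvCF_set_le V u)
  refine ⟨hP, ?_⟩
  have hQ : ∀ m u v V, n - v ≤ m →
      (loopA G n f u v V).1.length = V.length ∧ pvCF (loopA G n f u v V).1 ≤ pvCF V := by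
    intro m
    induction m with
    | zero =>
      intro u v V hm
      rw [loopA, dif_neg (by omega)]
      exact ⟨rfl, Nat.le_refl _⟩
    | succ m ih =>
      intro u v V hm
      by_cases hv : v < n
      · rw [loopA, dif_pos hv]
        by_cases hc : pvVis V v = false ∧ pvEdge G u v = true
        · rw [if_pos hc]
          have h1 := hP v V
          have h2 := ih u (v+1) (visitA G n f v V).1 (by omega)
          exact ⟨by rw [h2.1, h1.1], Nat.le_trans h2.2 h1.2⟩
        · rw [if_neg hc]
          exact ih u (v+1) V (by omega)
      · rw [loopA, dif_neg hv]
        exact ⟨rfl, Nat.le_refl _⟩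
  intro u v V
  exact hQ (n - v) u v V (Nat.le_refl _)

-- the simulation: one machine frame computes exactly A's loop continuation, then pops u
theorem sim (G : List (List Int)) (n : Nat) :
    ∀ f, ∀ m u k V rest out, n - k ≤ m → pvCF V < f →
      runM G n ((u,k) :: rest) V out
        = runM G n rest (loopA G n f u k V).1 (out ++ (loopA G n f u k V).2 ++ [(u : Int)]) := by
  intro f
  induction f using Nat.strongRecOn with
  | ind f ihf =>
  intro m
  induction m using Nat.strongRecOn with
  | ind m ihm =>
  intro u k V rest out hm hf
  cases hfind : findNext G n V u k with
  | none =>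
    have hnone := findNext_none G n V u k hfind
    rw [runM_step_none G n u k rest V out hfind,
        loopA_none G n f u (n - k) k V (Nat.le_refl _) hnone]
    simp
  | some v =>
    obtain ⟨hkv, hvn, hvis, hedge, hpre⟩ := findNext_spec G n V u k v hfind
    obtain ⟨f', rfl⟩ : ∃ f', f = f'+1 := ⟨f-1, by omega⟩
    have hcf1 : pvCF (V.set v true) < f' := by
      have := pvCF_set_lt V v hvis
      omega
    have step1 := runM_step_some G n u k v rest V out hfind
    have ih1 := ihf f' (by omega) (n - 0) v 0 (V.set v true) ((u, v+1) :: rest) out (Nat.le_refl _) hcf1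
    have hr : pvCF (visitA G n (f'+1) v V).1 < f'+1 :=
      Nat.lt_of_le_of_lt (Nat.le_trans ((pres G n (f'+1)).1 v V).2 (Nat.le_refl _)) hf
    have ih2 := ihm (m-1) (by omega) u (v+1) (visitA G n (f'+1) v V).1 rest
      (out ++ (visitA G n (f'+1) v V).2 ++ [(v : Int)]) (by omega) hr
    rw [step1, loopA_skip G n (f'+1) u (v - k) k v V (Nat.le_refl _) hkv (by omega) hpre,
        loopA_hit G n f' u v V hvn ⟨hvis, hedge⟩]
    rw [visitA_succ] at ih2 ⊢
    rw [ih1, ih2]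
    simp [List.append_assoc]

-- the main loops agree pointwise, carrying the invariant |visited| = n
theorem fold_eq (G : List (List Int)) (n idx : Nat) :
    ∀ (l : List Nat) (s : List Bool × List Int), (∀ u ∈ l, u < n) → s.1.length = n →
      l.foldl (fun s u => if pvVis s.1 u = false ∧ pvEdge G idx u then
          ((visitA G n (n+1) u s.1).1, s.2 ++ (visitA G n (n+1) u s.1).2 ++ [(u : Int)]) else s) s
      = l.foldl (fun s u => if pvVis s.1 u = false ∧ pvEdge G idx u then
          runM G n [(u, 0)] (s.1.set u true) s.2 else s) s := by
  intro l
  induction l with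
  | nil => intro s _ _; rfl
  | cons u l ih =>
    intro s hmem hlen
    simp only [List.foldl_cons]
    by_cases hc : pvVis s.1 u = false ∧ pvEdge G idx u = true
    · rw [if_pos hc, if_pos hc]
      have hun : u < n := hmem u (List.mem_cons_self ..)
      have hcf : pvCF (s.1.set u true) < n := by
        have h1 := pvCF_set_lt s.1 u hc.1
        have h2 := pvCF_le_length s.1
        omega
      have hsim := sim G n n n u 0 (s.1.set u true) [] s.2 (by omega) hcf
      rw [runM_nil] at hsim
      rw [hsim, visitA_succ G n n u s.1]
      exact ih _ (fun w hw => hmem w (List.mem_cons_of_mem _ hw))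
        (by rw [((pres G n n).2 u 0 (s.1.set u true)).1, List.length_set, hlen])
    · rw [if_neg hc, if_neg hc]
      exact ih s (fun w hw => hmem w (List.mem_cons_of_mem _ hw)) hlen

-- ===== VERDICT (by name: the statement is the Claim_ definition above) =====
theorem DFS_spec : Claim_equal_DFS := by
  intro G _ _
  unfold Spec_DFS DFS DFS_alt
  rw [fold_eq G G.length (pvMaxDegIdx G) (List.range G.length) _
      (fun u hu => List.mem_range.mp hu) (by simp)]
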